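-- pv_equiv track=rewrite | github.com/dice-group/KBQA-PG | KBQA/ranking/RANK_OF_TRIPLES/ranking.py | filter_table_until_last_rank
-- ===== SOURCE A (Python) =====
-- from typing import Dict
-- from typing import Tuple
--
-- def filter_table_until_last_rank(
--     subgraph_triples_ranked: dict, limit: int
-- ) -> Tuple[Dict, int]:
--     """
--     Given table with all triples of subgraph and rank for all of them. First "limit" + all triples with the last rank are returned.
--
--     This procedure returns "limit" triples. If there are triples with the same rank in the table, they will be returned additionally.
--     :param subgraph_triples_ranked: dictionary triples from subgraph-rank.
--     :param limit: how many triples from subgraph are needed.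
--     :return: First "limit" triples from subgraph with highest rank + all triples with last rank, last_rank.
--     """
--     ranked_triples: dict = {}
--     for triple_item, rank in sorted(
--         subgraph_triples_ranked.items(), key=lambda x: x[1], reverse=True
--     ):
--
--         if len(ranked_triples) < limit:
--             ranked_triples[triple_item] = rank
--             last_rank = rank
--         else:
--             if subgraph_triples_ranked[triple_item] == last_rank:
--                 ranked_triples[triple_item] = rank
--             else:
--                 break
--     return ranked_triples, last_rank
-- ===== SOURCE B (Python) =====
-- def filter_table_until_last_rank(subgraph_triples_ranked, limit):
--     items = list(subgraph_triples_ranked.items())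
--     k = min(limit, len(items))
--     # threshold: the k-th largest rank, found by sorting the rank values only
--     last_rank = sorted((r for _, r in items), reverse=True)[k - 1]
--     kept = [(t, r) for t, r in items if r >= last_rank]
--     kept = sorted(kept, key=lambda x: x[1], reverse=True)
--     return dict(kept), last_rank
-- ===== Notes on version B (the rewrite author's own statement) =====
-- stated objective: alternative
-- what changed: A sorts all (triple, rank) pairs and runs a stateful fill-then-ties loop with a break over a growing dict; B instead sorts only the rank values to read off the threshold (the min(limit,n)-th largest rank), filters the items by that threshold in one pass, and stable-sorts just the kept subset.
import Mathlib
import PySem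

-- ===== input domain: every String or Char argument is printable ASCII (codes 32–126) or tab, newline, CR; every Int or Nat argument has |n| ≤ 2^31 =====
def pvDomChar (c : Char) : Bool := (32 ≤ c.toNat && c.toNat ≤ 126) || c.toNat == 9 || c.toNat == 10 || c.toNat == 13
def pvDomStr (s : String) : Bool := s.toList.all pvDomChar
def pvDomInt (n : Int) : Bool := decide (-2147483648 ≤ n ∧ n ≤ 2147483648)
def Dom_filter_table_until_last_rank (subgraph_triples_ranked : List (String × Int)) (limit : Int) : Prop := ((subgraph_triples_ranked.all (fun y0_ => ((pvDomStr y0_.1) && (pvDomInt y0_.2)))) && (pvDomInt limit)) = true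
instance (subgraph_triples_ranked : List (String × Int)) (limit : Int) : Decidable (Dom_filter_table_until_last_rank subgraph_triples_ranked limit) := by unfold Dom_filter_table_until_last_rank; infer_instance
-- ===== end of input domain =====

-- B replaces A's "sort all items, then fill-and-break loop over a growing dict" by
-- "sort only the rank values to read off the threshold rank, filter the items by it,
-- sort just the kept subset" (objective: alternative decomposition, same return value).

-- ===== PORT A =====
-- A's for-loop with `break` over the sorted items, ported as structural recursion.
-- State: the dict being built and `last_rank` as an Option (none = not yet assigned).
-- A `none` result marks Python's exception paths (UnboundLocalError on `last_rank`
-- when limit < 1 or the dict is empty); those inputs are excluded by Pre_.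
def pvLoopA (src : List (String × Int)) (limit : Int) :
    List (String × Int) → PySem.Dict String Int → Option Int →
    Option (PySem.Dict String Int × Int)
  | [], d, lr => lr.map (fun l => (d, l))
  | (t, r) :: rest, d, lr =>
    if (d.size : Int) < limit then
      pvLoopA src limit rest (d.insert t r) (some r)
    else
      match lr with
      | none => none                                  -- last_rank referenced while unbound
      | some l =>
        match (PySem.Dict.mk src).get? t with         -- subgraph_triples_ranked[triple_item]
        | none => none                                -- KeyError (unreachable from sorted items)
        | some v =>
          if v == l then pvLoopA src limit rest (d.insert t r) (some l)
          else some (d, l)                            -- break, then return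

def filter_table_until_last_rank (subgraph_triples_ranked : List (String × Int)) (limit : Int) :
    (List (String × Int)) × Int :=
  match pvLoopA subgraph_triples_ranked limit
      (PySem.List.sorted subgraph_triples_ranked (fun x => x.2) true)
      PySem.Dict.empty none with
  | some (d, l) => (d.items, l)
  | none => ([], 0)

-- ===== PORT B =====
def filter_table_until_last_rank_alt (subgraph_triples_ranked : List (String × Int)) (limit : Int) :
    (List (String × Int)) × Int :=
  let items := subgraph_triples_ranked
  let k : Int := min limit (items.length : Int)
  match PySem.List.pyGet?
      (PySem.List.sorted (items.map (fun p => p.2)) (fun r => r) true) (k - 1) with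
  | none => ([], 0)                                   -- IndexError (excluded by Pre_)
  | some last_rank =>
    let kept := (items.filter (fun p => last_rank ≤ p.2))
    let keptSorted := PySem.List.sorted kept (fun p => p.2) true
    ((PySem.Dict.ofList keptSorted).items, last_rank)

-- ===== PRECONDITION & SPEC =====
-- Pre_ excludes the empty dict and limit < 1 (A raises UnboundLocalError on last_rank
-- there), and requires distinct keys because the Python argument is a dict, which the
-- association list represents faithfully only with unique keys.
def Pre_filter_table_until_last_rank (subgraph_triples_ranked : List (String × Int)) (limit : Int) : Prop :=
  subgraph_triples_ranked ≠ [] ∧ 1 ≤ limit ∧ (subgraph_triples_ranked.map Prod.fst).Nodup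
instance (subgraph_triples_ranked : List (String × Int)) (limit : Int) : Decidable (Pre_filter_table_until_last_rank subgraph_triples_ranked limit) := by unfold Pre_filter_table_until_last_rank; infer_instance

def pvWitness_filter_table_until_last_rank : (List (String × Int)) × Int := ([("a", 2), ("b", 1)], 1)

def Spec_filter_table_until_last_rank (subgraph_triples_ranked : List (String × Int)) (limit : Int) (out : (List (String × Int)) × Int) : Prop := out = filter_table_until_last_rank_alt subgraph_triples_ranked limit
instance (subgraph_triples_ranked : List (String × Int)) (limit : Int) (out : (List (String × Int)) × Int) : Decidable (Spec_filter_table_until_last_rank subgraph_triples_ranked limit out) := by unfold Spec_filter_table_until_last_rank; infer_instance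

-- ===== CLAIM (what is proved, stated in full; the proofs are below) =====
def Claim_equal_filter_table_until_last_rank : Prop := ∀ (subgraph_triples_ranked : List (String × Int)) (limit : Int), Dom_filter_table_until_last_rank subgraph_triples_ranked limit → Pre_filter_table_until_last_rank subgraph_triples_ranked limit → Spec_filter_table_until_last_rank subgraph_triples_ranked limit (filter_table_until_last_rank subgraph_triples_ranked limit)

-- ===== LEMMAS AND PROOFS =====

-- insertBy unfolding equations
theorem pv_insertBy_cons (bef : (String × Int) → (String × Int) → Bool) (x y : String × Int) (t : List (String × Int)) :
    PySem.List.insertBy bef x (y :: t) =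
      if bef x y then x :: y :: t else y :: PySem.List.insertBy bef x t := rfl

-- inserting an element strictly larger (by rank) than everything puts it in front
theorem pv_ins_front (x : String × Int) (ys : List (String × Int))
    (h : ∀ z ∈ ys, z.2 < x.2) :
    PySem.List.insertBy (fun a b => decide (b.2 < a.2)) x ys = x :: ys := by
  cases ys with
  | nil => rfl
  | cons y t =>
    rw [pv_insertBy_cons]
    simp [h y (by simp)]

-- filter commutes with a stable descending insertion into a descending-sorted list
theorem pv_ins_filter (p : (String × Int) → Bool) (x : String × Int) :
    ∀ (ys : List (String × Int)), ys.Pairwise (fun a b => b.2 ≤ a.2) →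
    (PySem.List.insertBy (fun a b => decide (b.2 < a.2)) x ys).filter p =
      if p x then PySem.List.insertBy (fun a b => decide (b.2 < a.2)) x (ys.filter p)
      else ys.filter p := by
  intro ys
  induction ys with
  | nil =>
    intro _
    by_cases hp : p x <;> simp [PySem.List.insertBy, List.filter, hp]
  | cons y t ih =>
    intro hpw
    rw [List.pairwise_cons] at hpw
    obtain ⟨hy, ht⟩ := hpw
    rw [pv_insertBy_cons]
    by_cases hcmp : y.2 < x.2
    · -- x goes in front; every element of y :: t has rank < x.2
      simp only [hcmp, decide_true, if_true]
      have hall : ∀ z ∈ (y :: t).filter p, z.2 < x.2 := by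
        intro z hz
        have hz' : z ∈ y :: t := List.mem_of_mem_filter hz
        rcases List.mem_cons.mp hz' with rfl | hz''
        · exact hcmp
        · exact lt_of_le_of_lt (hy z hz'') hcmp
      rw [pv_ins_front x _ hall]
      by_cases hp : p x <;> by_cases hpy : p y <;>
        simp [List.filter, hp, hpy]
    · simp only [hcmp, decide_false]
      by_cases hp : p x <;> by_cases hpy : p y <;>
        simp [List.filter, hp, hpy, ih ht, pv_insertBy_cons, hcmp]

-- filter commutes with the stable reverse sort by rank
theorem pv_sorted_filter_rev (p : (String × Int) → Bool) (xs : List (String × Int)) :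
    (PySem.List.sorted xs (fun x => x.2) true).filter p =
      PySem.List.sorted (xs.filter p) (fun x => x.2) true := by
  induction xs using List.reverseRecOn with
  | nil => rfl
  | append_singleton l x ih =>
    rw [PySem.List.sorted_rev_eq_foldl_insertBy, List.foldl_append]
    rw [← PySem.List.sorted_rev_eq_foldl_insertBy]
    simp only [List.foldl_cons, List.foldl_nil]
    rw [pv_ins_filter p x _ (PySem.List.sorted_pairwise_rev l (fun x => x.2))]
    rw [List.filter_append]
    by_cases hp : p x
    · simp only [hp, if_true, List.filter_cons, List.filter_nil]
      rw [ih]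
      rw [PySem.List.sorted_rev_eq_foldl_insertBy (l.filter p ++ [x]), List.foldl_append]
      simp only [List.foldl_cons, List.foldl_nil]
      rw [← PySem.List.sorted_rev_eq_foldl_insertBy]
    · simp only [hp, List.filter_cons, List.filter_nil]
      rw [ih]
      simp

-- the ranks of the sorted items are the sorted ranks
theorem pv_map_snd_sorted (xs : List (String × Int)) :
    (PySem.List.sorted xs (fun x => x.2) true).map (fun p => p.2) =
      PySem.List.sorted (xs.map (fun p => p.2)) (fun r => r) true := by
  have h1 : ((PySem.List.sorted xs (fun x => x.2) true).map (fun p => p.2)).Pairwise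
      (fun a b => b ≤ a) := by
    have := PySem.List.sorted_pairwise_rev xs (fun x => x.2)
    exact List.Pairwise.map _ (fun a b h => h) this
  have h2 : (PySem.List.sorted (xs.map (fun p => p.2)) (fun r => r) true).Pairwise
      (fun a b => b ≤ a) := PySem.List.sorted_pairwise_rev _ _
  have hperm : ((PySem.List.sorted xs (fun x => x.2) true).map (fun p => p.2)).Perm
      (PySem.List.sorted (xs.map (fun p => p.2)) (fun r => r) true) := by
    exact ((PySem.List.sorted_perm xs (fun x => x.2) true).map _).trans
      (PySem.List.sorted_perm _ _ true).symm
  have := PySem.List.eq_of_perm_of_pairwise_le_of_injective (l₁ := _) (l₂ := _)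
      (fun r : Int => r) (fun a b h => h)
      ((List.reverse_perm _).trans (hperm.trans (List.reverse_perm _).symm))
      (List.pairwise_reverse.mpr h1) (List.pairwise_reverse.mpr h2)
  exact List.reverse_inj.mp this

theorem pv_foldl_some_last :
    ∀ (u : List (String × Int)) (lr : Option Int),
      u.foldl (fun _ p => some p.2) lr =
        (match u.getLast? with | some q => some q.2 | none => lr) := by
  intro u
  induction u with
  | nil => intro lr; rfl
  | cons x u' ih =>
    intro lr
    rw [List.foldl_cons, ih]
    cases u' with
    | nil => rfl
    | cons y u'' =>
      rw [List.getLast?_cons_cons]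
      cases h : (y :: u'').getLast? with
      | none => simp at h
      | some q => simp

theorem pv_contains_false (d : PySem.Dict String Int) (t : String)
    (h : t ∉ d.items.map Prod.fst) : d.contains t = false := by
  rcases hc : d.contains t with _ | _
  · rfl
  · exact absurd (PySem.Dict.contains_iff_mem_keys d t |>.mp hc) (by
      simpa [PySem.Dict.keys] using h)

theorem pv_insert_fresh (d : PySem.Dict String Int) (t : String) (r : Int)
    (h : t ∉ d.items.map Prod.fst) :
    d.insert t r = PySem.Dict.mk (d.items ++ [(t, r)]) := by
  apply PySem.Dict.ext
  rw [PySem.Dict.items_insert_of_not_contains d r (pv_contains_false d t h)]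

theorem pvLoopA_fill (src : List (String × Int)) (limit : Int) :
    ∀ (u v : List (String × Int)) (d : PySem.Dict String Int) (lr : Option Int),
      ((d.items ++ u).map Prod.fst).Nodup →
      (d.size : Int) + u.length ≤ limit →
      pvLoopA src limit (u ++ v) d lr =
        pvLoopA src limit v (PySem.Dict.mk (d.items ++ u))
          (u.foldl (fun _ p => some p.2) lr) := by
  intro u
  induction u with
  | nil => intro v d lr _ _; simp
  | cons x u' ih =>
    obtain ⟨t, r⟩ := x
    intro v d lr hnd hsz
    have hlt : (d.size : Int) < limit := by
      simp only [List.length_cons] at hsz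
      push_cast at hsz ⊢
      omega
    have hfresh : t ∉ d.items.map Prod.fst := by
      simp only [List.map_append, List.nodup_append] at hnd
      intro hmem
      exact hnd.2.2 t hmem t (List.mem_map.mpr ⟨(t, r), by simp, rfl⟩) rfl
    rw [List.cons_append]
    show (if (d.size : Int) < limit then
        pvLoopA src limit (u' ++ v) (d.insert t r) (some r) else _) = _
    rw [if_pos hlt, pv_insert_fresh d t r hfresh]
    have hnd' : (((d.items ++ [(t, r)]) ++ u').map Prod.fst).Nodup := by
      rw [List.append_assoc]; exact hnd
    rw [ih v _ (some r) hnd' (by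
      rw [show (PySem.Dict.mk (d.items ++ [(t, r)])).size = d.size + 1 from by
        simp [PySem.Dict.size]]
      simp only [List.length_cons] at hsz
      push_cast at hsz ⊢
      omega)]
    simp

-- tie phase of A's loop: with the dict full, ties with last_rank are appended, then break
theorem pvLoopA_ties (src : List (String × Int)) (limit : Int) (l : Int) :
    ∀ (u v : List (String × Int)) (d : PySem.Dict String Int),
      ((d.items ++ u).map Prod.fst).Nodup →
      limit ≤ (d.size : Int) →
      (∀ q ∈ u, (PySem.Dict.mk src).get? q.1 = some q.2 ∧ q.2 = l) →
      (∀ q ∈ v.head?, (PySem.Dict.mk src).get? q.1 = some q.2 ∧ q.2 ≠ l) →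
      pvLoopA src limit (u ++ v) d (some l) = some (PySem.Dict.mk (d.items ++ u), l) := by
  intro u
  induction u with
  | nil =>
    intro v d _ hsz _ hv
    cases v with
    | nil => simp [pvLoopA]
    | cons q rest =>
      obtain ⟨t, r⟩ := q
      obtain ⟨hget, hne⟩ := hv (t, r) (by simp)
      simp only [List.nil_append]
      show (if (d.size : Int) < limit then _ else _) = _
      rw [if_neg (by omega)]
      simp only [hget]
      rw [if_neg (by simpa using hne)]
      simp
  | cons x u' ih =>
    obtain ⟨t, r⟩ := x
    intro v d hnd hsz hu hv
    obtain ⟨hget, hrl⟩ := hu (t, r) (by simp)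
    have hfresh : t ∉ d.items.map Prod.fst := by
      simp only [List.map_append, List.nodup_append] at hnd
      intro hmem
      exact hnd.2.2 t hmem t (List.mem_map.mpr ⟨(t, r), by simp, rfl⟩) rfl
    rw [List.cons_append]
    show (if (d.size : Int) < limit then _ else _) = _
    rw [if_neg (by omega)]
    simp only [hget]
    rw [if_pos (by simp only [beq_iff_eq]; exact hrl)]
    rw [pv_insert_fresh d t r hfresh]
    have hnd' : (((d.items ++ [(t, r)]) ++ u').map Prod.fst).Nodup := by
      rw [List.append_assoc]; exact hnd
    rw [ih v _ hnd' (by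
        rw [show (PySem.Dict.mk (d.items ++ [(t, r)])).size = d.size + 1 from by
          simp [PySem.Dict.size]]
        push_cast; omega)
      (fun q hq => hu q (by simp [hq])) hv]
    simp

-- on a descending list whose ranks are all ≤ l, filtering by (l ≤ ·) is the tie prefix
theorem pv_filter_eq_takeWhile (l : Int) :
    ∀ (m : List (String × Int)), m.Pairwise (fun a b => b.2 ≤ a.2) →
      (∀ q ∈ m, q.2 ≤ l) →
      m.filter (fun q => decide (l ≤ q.2)) = m.takeWhile (fun q => q.2 == l) := by
  intro m
  induction m with
  | nil => intro _ _; rfl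
  | cons q t ih =>
    intro hpw hle
    rw [List.pairwise_cons] at hpw
    by_cases hq : q.2 = l
    · rw [List.filter_cons, List.takeWhile_cons]
      simp only [hq]
      simp only [le_refl, decide_true, BEq.rfl, if_true]
      rw [ih hpw.2 (fun z hz => hle z (by simp [hz]))]
    · have hqlt : q.2 < l := lt_of_le_of_ne (hle q (by simp)) hq
      rw [List.filter_cons, List.takeWhile_cons]
      rw [if_neg (by simp; omega), if_neg (by simpa using hq)]
      rw [List.filter_eq_nil_iff.mpr]
      intro z hz
      have := hpw.1 z hz
      simp
      omega

theorem pv_main (src : List (String × Int)) (limit : Int)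
    (h1 : src ≠ []) (h2 : 1 ≤ limit) (h3 : (src.map Prod.fst).Nodup) :
    filter_table_until_last_rank src limit = filter_table_until_last_rank_alt src limit := by
  have hn : 0 < src.length := List.length_pos_iff.mpr h1
  set s := PySem.List.sorted src (fun x => x.2) true with hsdef
  have hsl : s.length = src.length := PySem.List.length_sorted src _ true
  have hsnd : (s.map Prod.fst).Nodup :=
    ((PySem.List.sorted_perm src (fun x => x.2) true).map Prod.fst).nodup_iff.mpr h3
  have hpw : s.Pairwise (fun a b => b.2 ≤ a.2) := PySem.List.sorted_pairwise_rev src (fun x => x.2)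
  have hmono : ∀ i j (hi : i < s.length) (hj : j < s.length), i < j → s[j].2 ≤ s[i].2 :=
    fun i j hi hj hij => (List.pairwise_iff_getElem.mp hpw) i j hi hj hij
  have hlook : ∀ q ∈ s, (PySem.Dict.mk src).get? q.1 = some q.2 := by
    intro q hq
    have hq' : (q.1, q.2) ∈ src := by
      simpa using (PySem.List.mem_sorted src _ true q).mp hq
    exact PySem.Dict.get?_of_mem_items _ hq' (by rw [PySem.Dict.keys_mk]; exact h3)
  set K := min limit.toNat src.length with hKdef
  have hK1 : 1 ≤ K := by omega
  have hKn : K ≤ src.length := by omega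
  have hKidx : K - 1 < s.length := by omega
  set lrk := (s[K-1]'hKidx).2 with hlrk
  -- ===== A side =====
  have hA : pvLoopA src limit s PySem.Dict.empty none =
      some (PySem.Dict.mk (s.take K ++ (s.drop K).takeWhile (fun q => q.2 == lrk)), lrk) := by
    conv_lhs => rw [← List.take_append_drop K s]
    rw [pvLoopA_fill src limit (s.take K) (s.drop K) PySem.Dict.empty none
      (by show ((s.take K).map Prod.fst).Nodup
          rw [List.map_take]
          exact ((s.map Prod.fst).take_sublist K).nodup hsnd)
      (by show ((0:Nat) : Int) + ((s.take K).length : Int) ≤ limit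
          rw [List.length_take]
          push_cast
          omega)]
    rw [pv_foldl_some_last]
    have hlast : (s.take K).getLast? = some (s[K-1]'hKidx) := by
      rw [List.getLast?_eq_getElem?]
      have hlt : (s.take K).length = K := by rw [List.length_take]; omega
      rw [hlt, List.getElem?_take_of_lt (by omega), List.getElem?_eq_getElem hKidx]
    rw [hlast]
    show pvLoopA src limit (s.drop K) (PySem.Dict.mk (PySem.Dict.empty.items ++ s.take K)) (some lrk) = _
    by_cases hln : limit ≤ (src.length : Int)
    · -- limit ≤ n : the tie phase runs with a full dict
      have hKlim : (K : Int) = limit := by omega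
      have hsplit : s.drop K =
          (s.drop K).takeWhile (fun q => q.2 == lrk) ++ (s.drop K).dropWhile (fun q => q.2 == lrk) :=
        (List.takeWhile_append_dropWhile).symm
      conv_lhs => rw [hsplit]
      rw [pvLoopA_ties src limit lrk _ _ _
        (by show ((s.take K ++ (s.drop K).takeWhile (fun q => q.2 == lrk)).map Prod.fst).Nodup
            have hpre : (s.take K ++ (s.drop K).takeWhile (fun q => q.2 == lrk)) <+: s :=
              ⟨(s.drop K).dropWhile (fun q => q.2 == lrk), by
                rw [List.append_assoc, List.takeWhile_append_dropWhile, List.take_append_drop]⟩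
            exact ((hpre.sublist).map Prod.fst).nodup hsnd)
        (by show limit ≤ ((PySem.Dict.mk (PySem.Dict.empty.items ++ s.take K)).size : Int)
            show limit ≤ ((([] ++ s.take K).length : Nat) : Int)
            rw [List.nil_append, List.length_take]
            push_cast
            omega)
        (by intro q hq
            constructor
            · exact hlook q ((List.drop_subset K s) ((List.takeWhile_sublist _).subset hq))
            · have hpq := List.mem_takeWhile_imp hq
              exact beq_iff_eq.mp hpq)
        (by intro q hq
            have hh : ((s.drop K).dropWhile (fun q => q.2 == lrk)).head? = some q :=
              Option.mem_def.mp hq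
            have hmem : q ∈ (s.drop K).dropWhile (fun q => q.2 == lrk) :=
              List.mem_of_mem_head? hq
            constructor
            · exact hlook q ((List.drop_subset K s) ((List.dropWhile_sublist _).subset hmem))
            · have := List.head?_dropWhile_not (fun q => q.2 == lrk) (s.drop K)
              rw [hh] at this
              simpa using this)]
      rfl
    · -- n < limit : everything was inserted in the fill phase, the loop input is exhausted
      have hKeq : K = src.length := by omega
      have hdrop : s.drop K = [] := List.drop_eq_nil_of_le (by omega)
      rw [hdrop]
      simp [pvLoopA, PySem.Dict.empty]
  have hA' : filter_table_until_last_rank src limit =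
      (s.take K ++ (s.drop K).takeWhile (fun q => q.2 == lrk), lrk) := by
    unfold filter_table_until_last_rank
    rw [← hsdef, hA]
  -- ===== B side =====
  have hmapidx : PySem.List.pyGet?
      (PySem.List.sorted (src.map (fun p => p.2)) (fun r => r) true)
      (min limit ((src.length : Nat) : Int) - 1) = some lrk := by
    rw [← pv_map_snd_sorted, ← hsdef]
    have hidx : min limit ((src.length : Nat) : Int) - 1 = ((K - 1 : Nat) : Int) := by omega
    rw [hidx, PySem.List.pyGet?_natCast, List.getElem?_map, List.getElem?_eq_getElem hKidx]
    rfl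
  have hsubf : List.Sublist (s.filter (fun q => decide (lrk ≤ q.2))) s := List.filter_sublist
  have hkeys2 : ((s.filter (fun q => decide (lrk ≤ q.2))).map Prod.fst).Nodup :=
    (hsubf.map Prod.fst).nodup hsnd
  have hofl : ∀ (m : List (String × Int)), (m.map Prod.fst).Nodup →
      (PySem.Dict.ofList m).items = m := by
    intro m hm
    have h0 : PySem.Dict.ofList m =
        List.foldl (fun acc p => acc.insert p.1 p.2) PySem.Dict.empty m := rfl
    rw [h0]
    have hfr := PySem.Dict.items_foldl_insert_fresh (ν := Int) m Prod.fst Prod.snd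
      PySem.Dict.empty (fun a _ => rfl) hm
    simpa using hfr
  have hB : filter_table_until_last_rank_alt src limit =
      (s.filter (fun q => decide (lrk ≤ q.2)), lrk) := by
    unfold filter_table_until_last_rank_alt
    simp only [hmapidx]
    rw [← pv_sorted_filter_rev, ← hsdef, hofl _ hkeys2]
  -- ===== the two descriptions agree =====
  have hfilter : s.filter (fun q => decide (lrk ≤ q.2)) =
      s.take K ++ (s.drop K).takeWhile (fun q => q.2 == lrk) := by
    conv_lhs => rw [← List.take_append_drop K s]
    rw [List.filter_append]
    congr 1
    · rw [List.filter_eq_self]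
      intro q hq
      obtain ⟨i, hi, rfl⟩ := List.mem_iff_getElem.mp hq
      have hi' : i < K := by
        have := hi; rw [List.length_take] at this; omega
      rw [List.getElem_take]
      simp only [decide_eq_true_eq]
      rcases Nat.lt_or_ge i (K - 1) with h | h
      · exact hmono i (K - 1) (by omega) hKidx h
      · have : i = K - 1 := by omega
        subst this
        exact le_refl _
    · exact pv_filter_eq_takeWhile lrk (s.drop K)
        (hpw.sublist (List.drop_sublist K s))
        (by intro q hq
            obtain ⟨j, hj, rfl⟩ := List.mem_iff_getElem.mp hq
            rw [List.getElem_drop]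
            exact hmono (K - 1) (K + j) hKidx
              (by rw [List.length_drop] at hj; omega) (by omega))
  rw [hA', hB, hfilter]

-- ===== VERDICT (by name: the statement is the Claim_ definition above) =====
theorem filter_table_until_last_rank_spec : Claim_equal_filter_table_until_last_rank := by
  intro src limit _ hpre
  exact pv_main src limit hpre.1 hpre.2.1 hpre.2.2
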